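-- pv_equiv track=rewrite | github.com/pypi-data/pypi-mirror-322 | packages/sql-testing-tools/sql_testing_tools-0.1.4.tar.gz/sql_testing_tools-0.1.4/sql_testing_tools/Helper.py | findTableForColumn
-- ===== SOURCE A (Python) =====
-- def findTableForColumn(data_dict, target_value, relevantTables):
--     l = []
--     for key, value_list in data_dict.items():
--         if key.lower() in relevantTables:
--             for sublist in value_list:
--                 if sublist and sublist[0].lower() == target_value.lower():
--                     l.append(key)
--     if len(l) == 0:
--         for key, value_list in data_dict.items():
--             for sublist in value_list:
--                 if sublist and sublist[0].lower() == target_value.lower():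
--                     l.append(key)
--     return l
-- ===== SOURCE B (Python) =====
-- def findTableForColumn(data_dict, target_value, relevantTables):
--     target = target_value.lower()
--     all_matches = [key
--                    for key, value_list in data_dict.items()
--                    for sublist in value_list
--                    if sublist and sublist[0].lower() == target]
--     relevant = [k for k in all_matches if k.lower() in relevantTables]
--     return relevant or all_matches
-- ===== Notes on version B (the rewrite author's own statement) =====
-- stated objective: faster
-- what changed: B makes a single collect-all pass over data_dict (instead of A's two conditional passes) and then filters the collected keys by relevantTables, falling back to the full match list when the filter is empty; it also lowercases target_value once instead of once per sublist.
import Mathlib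
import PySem

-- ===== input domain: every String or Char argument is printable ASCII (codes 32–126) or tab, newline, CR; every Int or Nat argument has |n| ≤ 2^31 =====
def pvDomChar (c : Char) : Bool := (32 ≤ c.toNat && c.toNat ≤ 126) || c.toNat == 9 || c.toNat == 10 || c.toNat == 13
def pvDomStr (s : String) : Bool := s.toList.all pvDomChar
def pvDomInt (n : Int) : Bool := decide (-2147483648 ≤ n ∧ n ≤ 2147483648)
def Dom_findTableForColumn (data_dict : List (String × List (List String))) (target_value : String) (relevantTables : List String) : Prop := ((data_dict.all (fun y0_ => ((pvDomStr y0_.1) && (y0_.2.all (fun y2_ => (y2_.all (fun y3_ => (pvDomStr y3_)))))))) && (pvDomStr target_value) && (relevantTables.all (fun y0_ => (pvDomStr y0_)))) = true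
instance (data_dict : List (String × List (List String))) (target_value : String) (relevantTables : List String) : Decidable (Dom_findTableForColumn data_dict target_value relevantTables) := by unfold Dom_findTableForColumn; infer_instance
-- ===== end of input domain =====

-- B replaces A's two conditional passes over the dict by one collect-all pass followed by a
-- membership filter on the collected keys (objective: simpler).

-- ===== PORT A =====
-- literal transliteration of A: pass 1 over relevant keys, then (if nothing found) pass 2 over all keys
def findTableForColumn (data_dict : List (String × List (List String))) (target_value : String) (relevantTables : List String) : List String :=
  let l : List String :=
    data_dict.foldl (fun l kv =>
      if relevantTables.contains (PySem.Str.lower kv.1) then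
        kv.2.foldl (fun l sublist =>
          match sublist with
          | [] => l
          | h :: _ => if PySem.Str.lower h = PySem.Str.lower target_value then l ++ [kv.1] else l) l
      else l) []
  if l.length = 0 then
    data_dict.foldl (fun l kv =>
      kv.2.foldl (fun l sublist =>
        match sublist with
        | [] => l
        | h :: _ => if PySem.Str.lower h = PySem.Str.lower target_value then l ++ [kv.1] else l) l) l
  else l

-- ===== PORT B =====
-- literal transliteration of B: one collect-all comprehension, then a membership filter
def findTableForColumn_alt (data_dict : List (String × List (List String))) (target_value : String) (relevantTables : List String) : List String :=
  let target := PySem.Str.lower target_value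
  let all_matches : List String :=
    data_dict.flatMap (fun kv =>
      (kv.2.filter (fun sublist =>
        match sublist with
        | [] => false
        | h :: _ => PySem.Str.lower h == target)).map (fun _ => kv.1))
  let relevant := all_matches.filter (fun k => relevantTables.contains (PySem.Str.lower k))
  if relevant = [] then all_matches else relevant

-- ===== PRECONDITION & SPEC =====
def Spec_findTableForColumn (data_dict : List (String × List (List String))) (target_value : String) (relevantTables : List String) (out : List String) : Prop := out = findTableForColumn_alt data_dict target_value relevantTables
instance (data_dict : List (String × List (List String))) (target_value : String) (relevantTables : List String) (out : List String) : Decidable (Spec_findTableForColumn data_dict target_value relevantTables out) := by unfold Spec_findTableForColumn; infer_instance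

-- ===== CLAIM (what is proved, stated in full; the proofs are below) =====
def Claim_equal_findTableForColumn : Prop := ∀ (data_dict : List (String × List (List String))) (target_value : String) (relevantTables : List String), Dom_findTableForColumn data_dict target_value relevantTables → Spec_findTableForColumn data_dict target_value relevantTables (findTableForColumn data_dict target_value relevantTables)

-- ===== LEMMAS AND PROOFS =====

-- the shared per-sublist match test, as B's filter predicate
def pvPred (t : String) (sublist : List String) : Bool :=
  match sublist with
  | [] => false
  | h :: _ => PySem.Str.lower h == PySem.Str.lower t

-- B's all_matches list
def pvAll (data_dict : List (String × List (List String))) (t : String) : List String :=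
  data_dict.flatMap (fun kv => (kv.2.filter (pvPred t)).map (fun _ => kv.1))

-- A's inner loop over one key's sublists = append the per-key matches
theorem pvInner (t k : String) (vs : List (List String)) (l : List String) :
    vs.foldl (fun l sublist =>
      match sublist with
      | [] => l
      | h :: _ => if PySem.Str.lower h = PySem.Str.lower t then l ++ [k] else l) l
    = l ++ (vs.filter (pvPred t)).map (fun _ => k) := by
  induction vs generalizing l with
  | nil => simp
  | cons v vs ih =>
    cases v with
    | nil => simpa [pvPred] using ih l
    | cons h rest =>
      by_cases hc : PySem.Str.lower h = PySem.Str.lower t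
      · simp [pvPred, hc, ih]
      · simp [pvPred, hc, ih]

-- A's second (unconditional) pass = l ++ pvAll
theorem pvPass2 (t : String) (d : List (String × List (List String))) (l : List String) :
    d.foldl (fun l kv =>
      kv.2.foldl (fun l sublist =>
        match sublist with
        | [] => l
        | h :: _ => if PySem.Str.lower h = PySem.Str.lower t then l ++ [kv.1] else l) l) l
    = l ++ pvAll d t := by
  induction d generalizing l with
  | nil => simp [pvAll]
  | cons kv d ih =>
    have hA : pvAll (kv :: d) t = (kv.2.filter (pvPred t)).map (fun _ => kv.1) ++ pvAll d t := by
      simp only [pvAll, List.flatMap_cons]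
    rw [List.foldl_cons, hA, pvInner, ih, List.append_assoc]

-- filtering a constant-mapped list keeps all or nothing
theorem pvFilterConst (p : String → Bool) (k : String) (xs : List (List String)) :
    (xs.map (fun _ => k)).filter p = if p k then xs.map (fun _ => k) else [] := by
  induction xs with
  | nil => simp
  | cons x xs ih => by_cases h : p k = true <;> simp [h]

-- A's first (conditional) pass = l ++ (pvAll filtered by relevantTables)
theorem pvPass1 (t : String) (r : List String) (d : List (String × List (List String))) (l : List String) :
    d.foldl (fun l kv =>
      if r.contains (PySem.Str.lower kv.1) then
        kv.2.foldl (fun l sublist =>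
          match sublist with
          | [] => l
          | h :: _ => if PySem.Str.lower h = PySem.Str.lower t then l ++ [kv.1] else l) l
      else l) l
    = l ++ (pvAll d t).filter (fun k => r.contains (PySem.Str.lower k)) := by
  induction d generalizing l with
  | nil => simp [pvAll]
  | cons kv d ih =>
    have hA : pvAll (kv :: d) t = (kv.2.filter (pvPred t)).map (fun _ => kv.1) ++ pvAll d t := by
      simp only [pvAll, List.flatMap_cons]
    rw [List.foldl_cons, hA, List.filter_append, pvFilterConst]
    by_cases hc : r.contains (PySem.Str.lower kv.1) = true
    · rw [if_pos hc, if_pos hc, pvInner, ih, List.append_assoc]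
    · rw [if_neg hc, if_neg hc, ih, List.nil_append]

-- ===== VERDICT (by name: the statement is the Claim_ definition above) =====
theorem findTableForColumn_spec : Claim_equal_findTableForColumn := by
  intro d t r _
  show findTableForColumn d t r = findTableForColumn_alt d t r
  have hB : findTableForColumn_alt d t r =
      (if (pvAll d t).filter (fun k => r.contains (PySem.Str.lower k)) = [] then pvAll d t
       else (pvAll d t).filter (fun k => r.contains (PySem.Str.lower k))) := rfl
  rw [hB]
  unfold findTableForColumn
  rw [pvPass1, List.nil_append]
  by_cases he : (pvAll d t).filter (fun k => r.contains (PySem.Str.lower k)) = []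
  · rw [he]
    simp only [List.length_nil, pvPass2, List.nil_append]
  · rw [if_neg (by simpa [List.length_eq_zero_iff] using he), if_neg he]
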